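-- pv_equiv track=rewrite | github.com/AlexAnsart/OPSEMIA | src/backend/core/chunking.py | _grouper_par_conversation
-- ===== SOURCE A (Python) =====
-- from collections import defaultdict
-- from typing import Any, Dict, List
--
-- def _identifier_interlocuteur(message: Dict[str, Any], numero_utilisateur: str = "user") -> str:
--     """Identifie l'interlocuteur d'un message (la personne avec qui on converse).
--
--     Args:
--         message: Message normalisé avec 'direction', 'from', 'to'
--         numero_utilisateur: Identifiant de l'utilisateur principal (défaut: "user")
--
--     Returns:
--         Identifiant de l'interlocuteur
--     """
--     direction = message.get("direction", "")
--
--     if direction == "incoming":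
--         # Message reçu → l'interlocuteur est l'expéditeur
--         return message.get("from", "inconnu")
--     else:
--         # Message envoyé → l'interlocuteur est le destinataire
--         return message.get("to", "inconnu")
--
-- def _grouper_par_conversation(messages: List[Dict[str, Any]]) -> Dict[str, List[Dict[str, Any]]]:
--     """Groupe les messages par conversation (même interlocuteur).
--
--     Args:
--         messages: Liste de tous les messages
--
--     Returns:
--         Dictionnaire {interlocuteur: [liste de messages]}
--     """
--     conversations = defaultdict(list)
--
--     for msg in messages:
--         interlocuteur = _identifier_interlocuteur(msg)
--         conversations[interlocuteur].append(msg)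
--
--     # Trier chaque conversation par timestamp
--     for interlocuteur in conversations:
--         conversations[interlocuteur].sort(
--             key=lambda m: m.get("timestamp", "")
--         )
--
--     return dict(conversations)
-- ===== SOURCE B (Python) =====
-- from typing import Any, Dict, List
--
--
-- def _identifier_interlocuteur(message: Dict[str, Any], numero_utilisateur: str = "user") -> str:
--     """Identifie l'interlocuteur d'un message."""
--     if message.get("direction", "") == "incoming":
--         return message.get("from", "inconnu")
--     return message.get("to", "inconnu")
--
--
-- def _grouper_par_conversation(messages: List[Dict[str, Any]]) -> Dict[str, List[Dict[str, Any]]]: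
--     """Collect the distinct interlocutors in first-occurrence order, then build each
--     conversation directly as a sorted filtered view of the whole message list."""
--     cles = []
--     for msg in messages:
--         k = _identifier_interlocuteur(msg)
--         if k not in cles:
--             cles.append(k)
--     return {k: sorted((m for m in messages if _identifier_interlocuteur(m) == k),
--                       key=lambda m: m.get("timestamp", ""))
--             for k in cles}
-- ===== Notes on version B (the rewrite author's own statement) =====
-- stated objective: simpler
-- what changed: A accumulates mutable defaultdict buckets in one pass and then sorts each bucket in place; B instead lists the distinct interlocutors in first-occurrence order and builds each conversation directly as a sorted filter of the whole message list (no mutable buckets, no per-bucket in-place sort).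
import Mathlib
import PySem

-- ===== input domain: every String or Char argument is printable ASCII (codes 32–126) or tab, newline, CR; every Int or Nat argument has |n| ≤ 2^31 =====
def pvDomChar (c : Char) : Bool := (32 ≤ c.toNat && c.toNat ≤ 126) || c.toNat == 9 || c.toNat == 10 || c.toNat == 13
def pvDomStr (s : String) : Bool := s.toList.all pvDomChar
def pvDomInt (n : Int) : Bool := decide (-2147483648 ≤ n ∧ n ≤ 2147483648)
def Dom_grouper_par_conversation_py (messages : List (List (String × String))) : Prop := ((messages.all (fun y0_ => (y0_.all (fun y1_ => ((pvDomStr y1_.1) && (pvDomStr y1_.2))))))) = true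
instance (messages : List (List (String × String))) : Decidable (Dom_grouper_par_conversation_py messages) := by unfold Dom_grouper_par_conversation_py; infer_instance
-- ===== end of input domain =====

-- B replaces A's mutable defaultdict buckets + per-bucket in-place sort by a
-- direct construction: distinct interlocutors in first-occurrence order, each
-- conversation built as a sorted filter of the whole list (simpler decomposition).

-- shared helper: both Pythons carry the identical helper `_identifier_interlocuteur`
-- and the identical timestamp key `m.get("timestamp", "")`
def pvIdent (message : List (String × String)) : String :=
  let direction := (PySem.Dict.ofList message).getD "direction" ""
  if direction = "incoming" then (PySem.Dict.ofList message).getD "from" "inconnu"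
  else (PySem.Dict.ofList message).getD "to" "inconnu"

def pvTs (m : List (String × String)) : String :=
  (PySem.Dict.ofList m).getD "timestamp" ""

-- ===== PORT A =====
-- defaultdict(list) accumulation, then each bucket sorted in place by timestamp;
-- the final dict(conversations) keeps the items unchanged and in order.
def grouper_par_conversation_py (messages : List (List (String × String))) : List (String × List (List (String × String))) :=
  let conversations := messages.foldl
    (fun d msg => d.modify (pvIdent msg) [] (fun l => l ++ [msg])) PySem.Dict.empty
  (conversations.items.map (fun kv => (kv.1, PySem.List.sorted kv.2 pvTs)))

-- ===== PORT B =====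
-- `cles`: the distinct interlocutors in first-occurrence order (a PySem.Set);
-- then a dict comprehension: each key paired with the sorted filter of all messages.
def grouper_par_conversation_py_alt (messages : List (List (String × String))) : List (String × List (List (String × String))) :=
  let cles : PySem.Set String := PySem.Set.ofList (messages.map pvIdent)
  cles.map (fun k => (k, PySem.List.sorted (messages.filter (fun m => pvIdent m == k)) pvTs))

-- ===== PRECONDITION & SPEC =====
def Spec_grouper_par_conversation_py (messages : List (List (String × String))) (out : List (String × List (List (String × String)))) : Prop := out = grouper_par_conversation_py_alt messages
instance (messages : List (List (String × String))) (out : List (String × List (List (String × String)))) : Decidable (Spec_grouper_par_conversation_py messages out) := by unfold Spec_grouper_par_conversation_py; infer_instance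

-- ===== CLAIM (what is proved, stated in full; the proofs are below) =====
def Claim_equal_grouper_par_conversation_py : Prop := ∀ (messages : List (List (String × String))), Dom_grouper_par_conversation_py messages → Spec_grouper_par_conversation_py messages (grouper_par_conversation_py messages)

-- ===== LEMMAS AND PROOFS =====

-- the grouping fold of A: each bucket is the filter of the traversed list by its key
theorem pv_bucket_filter (l : List (List (String × String))) (k : String) :
    (l.foldl (fun d msg => d.modify (pvIdent msg) [] (fun b => b ++ [msg]))
      (PySem.Dict.empty : PySem.Dict String (List (List (String × String))))).getD k []
      = l.filter (fun m => pvIdent m == k) := by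
  have h := PySem.Dict.getD_foldl_modify_append
    (l.map (fun m => (pvIdent m, m)))
    (PySem.Dict.empty : PySem.Dict String (List (List (String × String)))) k
  rw [List.foldl_map] at h
  simp only [List.filter_map] at h
  rw [h]
  simp [Function.comp_def]

-- keys of A's grouping fold: distinct keys in first-occurrence order
theorem pv_bucket_keys (l : List (List (String × String))) :
    (l.foldl (fun d msg => d.modify (pvIdent msg) [] (fun b => b ++ [msg]))
      (PySem.Dict.empty : PySem.Dict String (List (List (String × String))))).keys
      = PySem.Set.ofList (l.map pvIdent) := by
  have h := PySem.Dict.keys_foldl_modify_key l pvIdent []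
    (fun _ msg => (fun b => b ++ [msg]))
    (PySem.Dict.empty : PySem.Dict String (List (List (String × String))))
  simpa [PySem.Dict.empty, PySem.Dict.keys, PySem.Set.update, PySem.Set.ofList_eq_foldl] using h

-- A's result, in closed form: exactly B's program
theorem pv_A_closed (messages : List (List (String × String))) :
    grouper_par_conversation_py messages
      = (PySem.Set.ofList (messages.map pvIdent)).map
          (fun k => (k, PySem.List.sorted (messages.filter (fun m => pvIdent m == k)) pvTs)) := by
  simp only [grouper_par_conversation_py]
  have hnd : (messages.foldl (fun d msg => d.modify (pvIdent msg) [] (fun b => b ++ [msg]))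
      (PySem.Dict.empty : PySem.Dict String (List (List (String × String))))).keys.Nodup := by
    refine PySem.Dict.nodup_keys_foldl_modify_key messages pvIdent []
      (fun _ msg => (fun b => b ++ [msg])) _ ?_
    simp [PySem.Dict.empty, PySem.Dict.keys]
  rw [PySem.Dict.items_eq_map_keys _ hnd []]
  rw [pv_bucket_keys, List.map_map]
  refine List.map_congr_left ?_
  intro k _
  simp [pv_bucket_filter]

-- ===== VERDICT (by name: the statement is the Claim_ definition above) =====
theorem grouper_par_conversation_py_spec : Claim_equal_grouper_par_conversation_py := by
  intro messages _
  unfold Spec_grouper_par_conversation_py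
  rw [pv_A_closed]
  rfl
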